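-- pv_equiv track=rewrite | github.com/SamithVa/word_segmentation | utils/tokenizer.py | _tags_to_words
-- ===== SOURCE A (Python) =====
-- def _tags_to_words(text, tags):
--     """
--     Convert BMES tags to words.
--
--     Args:
--         text: input text
--         tags: list of BMES tags
--
--     Returns:
--         words: list of words
--     """
--     words = []
--     word = ""
--     for char, tag in zip(text, tags):
--         if tag == 'B':
--             if word:
--                 words.append(word)
--             word = char
--         elif tag == 'M':
--             word += char
--         elif tag == 'E':
--             word += char
--             words.append(word)
--             word = ""
--         elif tag == 'S':
--             if word:
--                 words.append(word)
--             words.append(char)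
--             word = ""
--
--     if word:
--         words.append(word)
--
--     return words
-- ===== SOURCE B (Python) =====
-- def _tags_to_words(text, tags):
--     # Two-pass decomposition: filter to (char, BMES-tag) pairs, then grow the
--     # output in place — start a new word at a boundary, else extend the last one.
--     kept = [(c, t) for c, t in zip(text, tags) if t in ('B', 'M', 'E', 'S')]
--     words = []
--     prev = None
--     for c, t in kept:
--         if prev in ('E', 'S') or t in ('B', 'S') or not words:
--             words.append(c)
--         else:
--             words[-1] += c
--         prev = t
--     return words
-- ===== Notes on version B (the rewrite author's own statement) =====
-- stated objective: alternative
-- what changed: Replaces A's open-word buffer with four flush/reset branches by a two-pass form: filter to BMES pairs, then one scan with a single boundary predicate (previous tag in E/S, current tag in B/S, or nothing emitted yet) that either starts a new output word or extends the last one in place, with no end-of-loop flush.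
import Mathlib
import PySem

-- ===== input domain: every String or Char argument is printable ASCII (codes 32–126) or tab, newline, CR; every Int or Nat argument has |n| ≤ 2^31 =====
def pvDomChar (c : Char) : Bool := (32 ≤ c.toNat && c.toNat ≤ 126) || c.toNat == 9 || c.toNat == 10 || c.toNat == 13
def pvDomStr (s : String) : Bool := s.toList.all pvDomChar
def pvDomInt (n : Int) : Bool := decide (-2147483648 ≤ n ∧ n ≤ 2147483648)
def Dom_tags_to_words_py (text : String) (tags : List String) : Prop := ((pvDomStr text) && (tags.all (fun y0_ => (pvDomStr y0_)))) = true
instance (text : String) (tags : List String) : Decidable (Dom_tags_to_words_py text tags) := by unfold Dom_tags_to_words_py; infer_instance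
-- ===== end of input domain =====

-- B is an alternative decomposition (filter to BMES pairs, then one scan with a single
-- boundary predicate extending the last output word in place); return values are equal everywhere.

-- ===== PORT A =====
-- A's loop state: (words, word); word kept as List Char mirroring Python string concatenation.
def pvAStep (st : List (List Char) × List Char) (p : Char × String) : List (List Char) × List Char :=
  if p.2 = "B" then ((if st.2 ≠ [] then st.1 ++ [st.2] else st.1), [p.1])
  else if p.2 = "M" then (st.1, st.2 ++ [p.1])
  else if p.2 = "E" then (st.1 ++ [st.2 ++ [p.1]], [])
  else if p.2 = "S" then ((if st.2 ≠ [] then st.1 ++ [st.2] else st.1) ++ [[p.1]], [])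
  else st

def tags_to_words_py (text : String) (tags : List String) : List String :=
  let st := (text.toList.zip tags).foldl pvAStep ([], [])
  (if st.2 ≠ [] then st.1 ++ [st.2] else st.1).map String.mk

-- ===== PORT B =====
-- B's loop state: (words, prev tag); extends the last word in place or starts a new one.
def pvBKeep (p : Char × String) : Bool :=
  p.2 == "B" || p.2 == "M" || p.2 == "E" || p.2 == "S"

def pvBStep (st : List (List Char) × Option String) (p : Char × String) : List (List Char) × Option String :=
  ( if st.2 = some "E" ∨ st.2 = some "S" ∨ p.2 = "B" ∨ p.2 = "S" ∨ st.1 = [] then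
      st.1 ++ [[p.1]]
    else
      st.1.dropLast ++ [st.1.getLastD [] ++ [p.1]],
    some p.2)

def tags_to_words_py_alt (text : String) (tags : List String) : List String :=
  let kept := (text.toList.zip tags).filter pvBKeep
  ((kept.foldl pvBStep ([], none)).1).map String.mk

-- ===== PRECONDITION & SPEC =====
def Spec_tags_to_words_py (text : String) (tags : List String) (out : List String) : Prop := out = tags_to_words_py_alt text tags
instance (text : String) (tags : List String) (out : List String) : Decidable (Spec_tags_to_words_py text tags out) := by unfold Spec_tags_to_words_py; infer_instance

-- ===== CLAIM (what is proved, stated in full; the proofs are below) =====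
def Claim_equal_tags_to_words_py : Prop := ∀ (text : String) (tags : List String), Dom_tags_to_words_py text tags → Spec_tags_to_words_py text tags (tags_to_words_py text tags)

-- ===== LEMMAS AND PROOFS =====

-- A's step is the identity on pairs B's filter drops.
theorem pvAStep_skip (st : List (List Char) × List Char) (p : Char × String)
    (h : pvBKeep p = false) : pvAStep st p = st := by
  simp [pvBKeep] at h
  obtain ⟨⟨⟨h1, h2⟩, h3⟩, h4⟩ := h
  simp [pvAStep, h1, h2, h3, h4]

-- Folding A's step over all pairs equals folding it over the kept pairs only.
theorem pvA_fold_filter (l : List (Char × String)) (st : List (List Char) × List Char) :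
    l.foldl pvAStep st = (l.filter pvBKeep).foldl pvAStep st := by
  induction l generalizing st with
  | nil => rfl
  | cons p l ih =>
    by_cases h : pvBKeep p = true
    · simp [List.filter, h, ih]
    · simp only [Bool.not_eq_true] at h
      simp [List.filter, h, pvAStep_skip st p h, ih]

-- The simulation invariant between A's state (over kept pairs) and B's state.
def pvR (a : List (List Char) × List Char) (b : List (List Char) × Option String) : Prop :=
  (a.2 = [] → b.1 = a.1 ∧ (b.2 = some "E" ∨ b.2 = some "S" ∨ b.1 = [])) ∧
  (a.2 ≠ [] → b.1 = a.1 ++ [a.2] ∧ b.2 ≠ some "E" ∧ b.2 ≠ some "S")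

theorem pvR_step (a : List (List Char) × List Char) (b : List (List Char) × Option String)
    (p : Char × String) (hk : pvBKeep p = true) (h : pvR a b) :
    pvR (pvAStep a p) (pvBStep b p) := by
  obtain ⟨c, t⟩ := p
  simp only [pvBKeep, Bool.or_eq_true, beq_iff_eq] at hk
  by_cases ha : a.2 = []
  · obtain ⟨hb1, hb2⟩ := (h.1 ha)
    rcases hk with ((ht | ht) | ht) | ht <;>
      subst ht <;>
      simp_all [pvAStep, pvBStep, pvR]
  · obtain ⟨hb1, hbE, hbS⟩ := h.2 ha
    rcases hk with ((ht | ht) | ht) | ht <;>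
      subst ht <;>
      simp_all [pvAStep, pvBStep, pvR]

theorem pvR_fold (l : List (Char × String)) (hl : ∀ p ∈ l, pvBKeep p = true)
    (a : List (List Char) × List Char) (b : List (List Char) × Option String)
    (h : pvR a b) : pvR (l.foldl pvAStep a) (l.foldl pvBStep b) := by
  induction l generalizing a b with
  | nil => simpa
  | cons p l ih =>
    exact ih (fun q hq => hl q (List.mem_cons_of_mem _ hq)) _ _
      (pvR_step a b p (hl p (by simp)) h)

-- ===== VERDICT (by name: the statement is the Claim_ definition above) =====
theorem tags_to_words_py_spec : Claim_equal_tags_to_words_py := by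
  intro text tags _
  unfold Spec_tags_to_words_py tags_to_words_py tags_to_words_py_alt
  rw [pvA_fold_filter]
  set kept := (text.toList.zip tags).filter pvBKeep with hkept
  have hall : ∀ p ∈ kept, pvBKeep p = true := fun p hp => (List.mem_filter.mp (hkept ▸ hp)).2
  have hR : pvR (kept.foldl pvAStep ([], [])) (kept.foldl pvBStep ([], none)) := by
    apply pvR_fold kept hall
    constructor
    · intro _; exact ⟨rfl, Or.inr (Or.inr rfl)⟩
    · intro h; exact absurd rfl h
  set sa := kept.foldl pvAStep ([], []) with hsa
  set sb := kept.foldl pvBStep ([], none) with hsb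
  show List.map String.mk (if sa.2 ≠ [] then sa.1 ++ [sa.2] else sa.1) = List.map String.mk sb.1
  by_cases hw : sa.2 = []
  · rw [(hR.1 hw).1]; simp [hw]
  · rw [(hR.2 hw).1]; simp [hw]
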